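-- pv_equiv track=rewrite | github.com/KSH23/algorithm_practice | SWEA/12523.py | delta_search
-- ===== SOURCE A (Python) =====
-- def delta_search(n, num_list):
--     di = [-1, 1, 0, 0]
--     dj = [0, 0, -1, 1]
--     total_sum = 0
--
--     for i in range(n):
--         for j in range(n):
--             for cnt in range(4):
--                 if 0 <= i + di[cnt] and i + di[cnt] < n and 0 <= j + dj[cnt] and j + dj[cnt] < n:
--                     temp_sum = num_list[i][j] - num_list[i + di[cnt]][j + dj[cnt]]
--                     if temp_sum > 0:
--                         total_sum += temp_sum
--                     else:
--                         total_sum -= temp_sum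
--     return total_sum
-- ===== SOURCE B (Python) =====
-- def delta_search(n, num_list):
--     total = 0
--     for i in range(n):
--         for j in range(n - 1):
--             total += abs(num_list[i][j] - num_list[i][j + 1])
--     for i in range(n - 1):
--         for j in range(n):
--             total += abs(num_list[i][j] - num_list[i + 1][j])
--     return 2 * total
-- ===== Notes on version B (the rewrite author's own statement) =====
-- stated objective: alternative
-- what changed: Replaces the 4-direction per-cell scan with direction arrays and per-direction bounds checks by two passes over the unique horizontal and vertical adjacent pairs, doubling the total since each undirected adjacency is counted twice in A.
import Mathlib
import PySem

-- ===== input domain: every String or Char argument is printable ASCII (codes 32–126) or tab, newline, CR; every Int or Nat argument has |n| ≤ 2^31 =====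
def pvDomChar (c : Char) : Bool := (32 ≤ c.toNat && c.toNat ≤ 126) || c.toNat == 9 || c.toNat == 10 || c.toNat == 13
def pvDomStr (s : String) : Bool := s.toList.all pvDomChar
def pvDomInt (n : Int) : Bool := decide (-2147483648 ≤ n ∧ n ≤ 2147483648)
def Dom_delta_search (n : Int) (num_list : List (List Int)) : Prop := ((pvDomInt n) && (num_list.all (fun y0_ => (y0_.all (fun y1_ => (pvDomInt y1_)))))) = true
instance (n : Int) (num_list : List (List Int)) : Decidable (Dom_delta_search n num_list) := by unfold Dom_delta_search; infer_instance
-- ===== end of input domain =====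

-- B replaces A's 4-direction per-cell scan (direction arrays + per-direction bounds checks) by
-- two passes over the unique horizontal and vertical adjacent pairs, doubling the total
-- (each undirected adjacency is counted twice in A).

-- shared indexing helper: num_list[i][j] (Python raises where pyGet? is none; Pre_ excludes that,
-- so the getD defaults are never reached on admitted inputs)
def cell (num_list : List (List Int)) (i j : Int) : Int :=
  (PySem.List.pyGet? ((PySem.List.pyGet? num_list i).getD []) j).getD 0

-- ===== PORT A =====
def delta_search (n : Int) (num_list : List (List Int)) : Int :=
  let di : List Int := [-1, 1, 0, 0]
  let dj : List Int := [0, 0, -1, 1]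
  (PySem.List.pyRange 0 n 1).foldl (fun acc i =>
    (PySem.List.pyRange 0 n 1).foldl (fun acc j =>
      (PySem.List.pyRange 0 4 1).foldl (fun acc cnt =>
        let dic := (PySem.List.pyGet? di cnt).getD 0
        let djc := (PySem.List.pyGet? dj cnt).getD 0
        if 0 ≤ i + dic ∧ i + dic < n ∧ 0 ≤ j + djc ∧ j + djc < n then
          let temp := cell num_list i j - cell num_list (i + dic) (j + djc)
          if temp > 0 then acc + temp else acc - temp
        else acc) acc) acc) 0

-- ===== PORT B =====
def delta_search_alt (n : Int) (num_list : List (List Int)) : Int :=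
  let t1 := (PySem.List.pyRange 0 n 1).foldl (fun acc i =>
    (PySem.List.pyRange 0 (n - 1) 1).foldl (fun acc j =>
      acc + |cell num_list i j - cell num_list i (j + 1)|) acc) 0
  let t2 := (PySem.List.pyRange 0 (n - 1) 1).foldl (fun acc i =>
    (PySem.List.pyRange 0 n 1).foldl (fun acc j =>
      acc + |cell num_list i j - cell num_list (i + 1) j|) acc) t1
  2 * t2

-- ===== PRECONDITION & SPEC =====
-- Pre_ excludes exactly the inputs where Python A raises IndexError: for n ≥ 2 A reads every
-- num_list[i][j] with 0 ≤ i, j < n (each such cell has an in-range neighbour), so the first n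
-- rows must exist and have length ≥ n; for n ≤ 1 no neighbour check ever passes and A reads nothing.
def Pre_delta_search (n : Int) (num_list : List (List Int)) : Prop :=
  n ≤ 1 ∨ (n ≤ (num_list.length : Int) ∧ ∀ row ∈ num_list.take n.toNat, n ≤ (row.length : Int))
instance (n : Int) (num_list : List (List Int)) : Decidable (Pre_delta_search n num_list) := by
  unfold Pre_delta_search; infer_instance
def pvWitness_delta_search : Int × List (List Int) := (2, [[1, 2], [3, 4]])

def Spec_delta_search (n : Int) (num_list : List (List Int)) (out : Int) : Prop := out = delta_search_alt n num_list
instance (n : Int) (num_list : List (List Int)) (out : Int) : Decidable (Spec_delta_search n num_list out) := by unfold Spec_delta_search; infer_instance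

-- ===== CLAIM (what is proved, stated in full; the proofs are below) =====
def Claim_equal_delta_search : Prop := ∀ (n : Int) (num_list : List (List Int)), Dom_delta_search n num_list → Pre_delta_search n num_list → Spec_delta_search n num_list (delta_search n num_list)

-- ===== LEMMAS AND PROOFS =====

-- Python's `if t > 0: s += t else: s -= t` is s + |t|
theorem step_abs (s t : Int) : (if t > 0 then s + t else s - t) = s + |t| := by
  by_cases h : t > 0
  · rw [if_pos h, abs_of_pos h]
  · rw [if_neg h, abs_of_nonpos (by omega), sub_eq_add_neg]

theorem comb (C : Prop) [Decidable C] (acc t : Int) :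
    (if C then (if t > 0 then acc + t else acc - t) else acc) = acc + (if C then |t| else 0) := by
  by_cases h : C <;> simp [h, step_abs]

-- the four-direction body of A, as a sum of four guarded terms
def F (n : Int) (L : List (List Int)) (i j : Int) : Int :=
  (if 0 ≤ i + -1 ∧ i + -1 < n ∧ 0 ≤ j + 0 ∧ j + 0 < n then |cell L i j - cell L (i + -1) (j + 0)| else 0)
  + (if 0 ≤ i + 1 ∧ i + 1 < n ∧ 0 ≤ j + 0 ∧ j + 0 < n then |cell L i j - cell L (i + 1) (j + 0)| else 0)
  + (if 0 ≤ i + 0 ∧ i + 0 < n ∧ 0 ≤ j + -1 ∧ j + -1 < n then |cell L i j - cell L (i + 0) (j + -1)| else 0)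
  + (if 0 ≤ i + 0 ∧ i + 0 < n ∧ 0 ≤ j + 1 ∧ j + 1 < n then |cell L i j - cell L (i + 0) (j + 1)| else 0)

theorem innerA (n : Int) (L : List (List Int)) (i j acc : Int) :
    (PySem.List.pyRange 0 4 1).foldl (fun acc cnt =>
        let dic := (PySem.List.pyGet? ([-1, 1, 0, 0] : List Int) cnt).getD 0
        let djc := (PySem.List.pyGet? ([0, 0, -1, 1] : List Int) cnt).getD 0
        if 0 ≤ i + dic ∧ i + dic < n ∧ 0 ≤ j + djc ∧ j + djc < n then
          let temp := cell L i j - cell L (i + dic) (j + djc)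
          if temp > 0 then acc + temp else acc - temp
        else acc) acc
    = acc + F n L i j := by
  have h4 : PySem.List.pyRange 0 4 1 = [0, 1, 2, 3] := rfl
  have g0 : (PySem.List.pyGet? ([-1, 1, 0, 0] : List Int) 0).getD 0 = -1 := rfl
  have g1 : (PySem.List.pyGet? ([-1, 1, 0, 0] : List Int) 1).getD 0 = 1 := rfl
  have g2 : (PySem.List.pyGet? ([-1, 1, 0, 0] : List Int) 2).getD 0 = 0 := rfl
  have g3 : (PySem.List.pyGet? ([-1, 1, 0, 0] : List Int) 3).getD 0 = 0 := rfl
  have h0 : (PySem.List.pyGet? ([0, 0, -1, 1] : List Int) 0).getD 0 = 0 := rfl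
  have h1 : (PySem.List.pyGet? ([0, 0, -1, 1] : List Int) 1).getD 0 = 0 := rfl
  have h2 : (PySem.List.pyGet? ([0, 0, -1, 1] : List Int) 2).getD 0 = -1 := rfl
  have h3 : (PySem.List.pyGet? ([0, 0, -1, 1] : List Int) 3).getD 0 = 1 := rfl
  unfold F
  simp only [h4, List.foldl_cons, List.foldl_nil, g0, g1, g2, g3, h0, h1, h2, h3, comb]
  ring

theorem pyRange_nonpos (n : Int) (h : n ≤ 0) : PySem.List.pyRange 0 n 1 = [] := by
  simp [PySem.List.pyRange]; omega

theorem list_sum_range (N : ℕ) (f : ℕ → ℤ) :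
    ((List.range N).map f).sum = ∑ j ∈ Finset.range N, f j := rfl

-- a doubly nested accumulate-loop over two ranges is a double sum
theorem double_fold_sum (M K : ℕ) (g : ℤ → ℤ → ℤ) (a : ℤ) :
    (List.map (fun k : ℕ => (k : Int)) (List.range M)).foldl (fun acc i =>
      (List.map (fun k : ℕ => (k : Int)) (List.range K)).foldl (fun acc j => acc + g i j) acc) a
    = a + ∑ i ∈ Finset.range M, ∑ j ∈ Finset.range K, g ↑i ↑j := by
  rw [List.foldl_map]
  refine (PySem.List.foldl_congr_mem _ _ (fun acc (k : ℕ) => acc + ∑ j ∈ Finset.range K, g ↑k ↑j) a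
    (fun acc k _ => by rw [List.foldl_map, PySem.List.foldl_add, list_sum_range])).trans ?_
  rw [PySem.List.foldl_add, list_sum_range]

-- A as a double Finset sum of F
theorem A_eq_sum (n : Int) (L : List (List Int)) (h : 0 ≤ n) :
    delta_search n L = ∑ i ∈ Finset.range n.toNat, ∑ j ∈ Finset.range n.toNat, F n L ↑i ↑j := by
  have hn : n = (n.toNat : Int) := (Int.toNat_of_nonneg h).symm
  show (PySem.List.pyRange 0 n 1).foldl _ 0 = _
  rw [hn, PySem.List.pyRange_zero_natCast, List.foldl_map]
  have hbody : ∀ (acc : Int) (i : Int),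
      (List.map (fun k : ℕ => (k : Int)) (List.range n.toNat)).foldl (fun acc j =>
        (PySem.List.pyRange 0 4 1).foldl (fun acc cnt =>
          let dic := (PySem.List.pyGet? ([-1, 1, 0, 0] : List Int) cnt).getD 0
          let djc := (PySem.List.pyGet? ([0, 0, -1, 1] : List Int) cnt).getD 0
          if 0 ≤ i + dic ∧ i + dic < ((n.toNat : Int)) ∧ 0 ≤ j + djc ∧ j + djc < ((n.toNat : Int)) then
            let temp := cell L i j - cell L (i + dic) (j + djc)
            if temp > 0 then acc + temp else acc - temp
          else acc) acc) acc
      = acc + ∑ j ∈ Finset.range n.toNat, F ((n.toNat : Int)) L i ↑j := by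
    intro acc i
    rw [List.foldl_map]
    refine (PySem.List.foldl_congr_mem _ _ (fun acc (k : ℕ) => acc + F ((n.toNat : Int)) L i ↑k) acc
      (fun acc k _ => innerA ((n.toNat : Int)) L i ↑k acc)).trans ?_
    rw [PySem.List.foldl_add, list_sum_range]
  refine (PySem.List.foldl_congr_mem _ _ (fun acc (k : ℕ) => acc + ∑ j ∈ Finset.range n.toNat, F ((n.toNat : Int)) L ↑k ↑j) 0
    (fun acc k _ => hbody acc ↑k)).trans ?_
  rw [PySem.List.foldl_add, list_sum_range, zero_add, ← hn]

-- B as a double Finset sum over the unique horizontal / vertical pairs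
theorem B_eq_sum (n : Int) (L : List (List Int)) (h : 0 ≤ n) :
    delta_search_alt n L
      = 2 * ((∑ i ∈ Finset.range n.toNat, ∑ j ∈ Finset.range (n.toNat - 1), |cell L ↑i ↑j - cell L ↑i (↑j + 1)|)
           + (∑ i ∈ Finset.range (n.toNat - 1), ∑ j ∈ Finset.range n.toNat, |cell L ↑i ↑j - cell L (↑i + 1) ↑j|)) := by
  rcases eq_or_lt_of_le h with h0 | h1
  · have e1 : PySem.List.pyRange 0 n 1 = [] := pyRange_nonpos n (by omega)
    have e2 : PySem.List.pyRange 0 (n - 1) 1 = [] := pyRange_nonpos (n - 1) (by omega)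
    have hz : n.toNat = 0 := by omega
    unfold delta_search_alt
    rw [e1, e2, hz]
    simp
  · have hn : n = (n.toNat : Int) := (Int.toNat_of_nonneg h).symm
    have hm : n - 1 = ((n.toNat - 1 : ℕ) : Int) := by omega
    unfold delta_search_alt
    rw [hm, hn, PySem.List.pyRange_zero_natCast, PySem.List.pyRange_zero_natCast]
    simp only [Int.toNat_natCast]
    rw [double_fold_sum, double_fold_sum, zero_add]

theorem sum_if_pull (P : Prop) [Decidable P] (s : Finset ℕ) (f : ℕ → ℤ) :
    (∑ j ∈ s, if P then f j else 0) = if P then ∑ j ∈ s, f j else 0 := by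
  split_ifs <;> simp

-- trim: a guarded sum over range N whose last index is dead
theorem sum_trim (N : ℕ) (c : ℕ → ℤ) :
    (∑ j ∈ Finset.range N, if j + 1 < N then c j else 0) = ∑ j ∈ Finset.range (N - 1), c j := by
  cases N with
  | zero => simp
  | succ M =>
    rw [Finset.sum_range_succ, if_neg (by omega)]
    simp only [Nat.add_sub_cancel, add_zero]
    exact Finset.sum_congr rfl (fun j hj => if_pos (by have := Finset.mem_range.mp hj; omega))

-- shift: a guarded sum over range N whose first index is dead
theorem sum_shift (N : ℕ) (e : ℕ → ℤ) :
    (∑ j ∈ Finset.range N, if 1 ≤ j then e j else 0) = ∑ j ∈ Finset.range (N - 1), e (j + 1) := by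
  cases N with
  | zero => simp
  | succ M =>
    rw [Finset.sum_range_succ']
    simp

-- the pairing identity: every undirected adjacency is counted twice in the 4-direction scan
theorem pairing (N : ℕ) (L : List (List Int)) :
    (∑ i ∈ Finset.range N, ∑ j ∈ Finset.range N, F ((N : Int)) L ↑i ↑j)
      = 2 * ((∑ i ∈ Finset.range N, ∑ j ∈ Finset.range (N - 1), |cell L ↑i ↑j - cell L ↑i (↑j + 1)|)
           + (∑ i ∈ Finset.range (N - 1), ∑ j ∈ Finset.range N, |cell L ↑i ↑j - cell L (↑i + 1) ↑j|)) := by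
  have hsplit : ∀ i ∈ Finset.range N, ∀ j ∈ Finset.range N, F ((N : Int)) L ↑i ↑j =
      ((if 1 ≤ i then |cell L ↑i ↑j - cell L (↑i + -1) ↑j| else 0)
      + (if i + 1 < N then |cell L ↑i ↑j - cell L (↑i + 1) ↑j| else 0))
      + ((if 1 ≤ j then |cell L ↑i ↑j - cell L ↑i (↑j + -1)| else 0)
      + (if j + 1 < N then |cell L ↑i ↑j - cell L ↑i (↑j + 1)| else 0)) := by
    intro i hi j hj
    have hi' := Finset.mem_range.mp hi
    have hj' := Finset.mem_range.mp hj
    unfold F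
    rw [if_congr (show (0 ≤ (i:ℤ) + -1 ∧ (i:ℤ) + -1 < (N:ℤ) ∧ 0 ≤ (j:ℤ) + 0 ∧ (j:ℤ) + 0 < (N:ℤ)) ↔ 1 ≤ i by omega)
         (show |cell L ↑i ↑j - cell L ((i:ℤ) + -1) ((j:ℤ) + 0)| = |cell L ↑i ↑j - cell L ((i:ℤ) + -1) (j:ℤ)| by norm_num) rfl,
       if_congr (show (0 ≤ (i:ℤ) + 1 ∧ (i:ℤ) + 1 < (N:ℤ) ∧ 0 ≤ (j:ℤ) + 0 ∧ (j:ℤ) + 0 < (N:ℤ)) ↔ i + 1 < N by omega)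
         (show |cell L ↑i ↑j - cell L ((i:ℤ) + 1) ((j:ℤ) + 0)| = |cell L ↑i ↑j - cell L ((i:ℤ) + 1) (j:ℤ)| by norm_num) rfl,
       if_congr (show (0 ≤ (i:ℤ) + 0 ∧ (i:ℤ) + 0 < (N:ℤ) ∧ 0 ≤ (j:ℤ) + -1 ∧ (j:ℤ) + -1 < (N:ℤ)) ↔ 1 ≤ j by omega)
         (show |cell L ↑i ↑j - cell L ((i:ℤ) + 0) ((j:ℤ) + -1)| = |cell L ↑i ↑j - cell L (i:ℤ) ((j:ℤ) + -1)| by norm_num) rfl,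
       if_congr (show (0 ≤ (i:ℤ) + 0 ∧ (i:ℤ) + 0 < (N:ℤ) ∧ 0 ≤ (j:ℤ) + 1 ∧ (j:ℤ) + 1 < (N:ℤ)) ↔ j + 1 < N by omega)
         (show |cell L ↑i ↑j - cell L ((i:ℤ) + 0) ((j:ℤ) + 1)| = |cell L ↑i ↑j - cell L (i:ℤ) ((j:ℤ) + 1)| by norm_num) rfl]
    ring
  rw [Finset.sum_congr rfl (fun i hi => Finset.sum_congr rfl (fun j hj => hsplit i hi j hj))]
  simp only [Finset.sum_add_distrib]
  have hup : (∑ i ∈ Finset.range N, ∑ j ∈ Finset.range N, if 1 ≤ i then |cell L ↑i ↑j - cell L (↑i + -1) ↑j| else 0)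
      = ∑ i ∈ Finset.range (N - 1), ∑ j ∈ Finset.range N, |cell L ↑i ↑j - cell L (↑i + 1) ↑j| := by
    rw [Finset.sum_congr rfl (fun i _ => sum_if_pull (1 ≤ i) (Finset.range N) _), sum_shift]
    refine Finset.sum_congr rfl (fun i _ => Finset.sum_congr rfl (fun j _ => ?_))
    have e1 : ((i + 1 : ℕ) : ℤ) + -1 = (i : ℤ) := by push_cast; ring
    have e2 : ((i + 1 : ℕ) : ℤ) = (i : ℤ) + 1 := by push_cast; ring
    rw [e1, e2, abs_sub_comm]
  have hdown : (∑ i ∈ Finset.range N, ∑ j ∈ Finset.range N, if i + 1 < N then |cell L ↑i ↑j - cell L (↑i + 1) ↑j| else 0)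
      = ∑ i ∈ Finset.range (N - 1), ∑ j ∈ Finset.range N, |cell L ↑i ↑j - cell L (↑i + 1) ↑j| := by
    rw [Finset.sum_congr rfl (fun i _ => sum_if_pull (i + 1 < N) (Finset.range N) _), sum_trim]
  have hleft : (∑ i ∈ Finset.range N, ∑ j ∈ Finset.range N, if 1 ≤ j then |cell L ↑i ↑j - cell L ↑i (↑j + -1)| else 0)
      = ∑ i ∈ Finset.range N, ∑ j ∈ Finset.range (N - 1), |cell L ↑i ↑j - cell L ↑i (↑j + 1)| := by
    refine Finset.sum_congr rfl (fun i _ => ?_)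
    rw [sum_shift]
    refine Finset.sum_congr rfl (fun j _ => ?_)
    have e1 : ((j + 1 : ℕ) : ℤ) + -1 = (j : ℤ) := by push_cast; ring
    have e2 : ((j + 1 : ℕ) : ℤ) = (j : ℤ) + 1 := by push_cast; ring
    rw [e1, e2, abs_sub_comm]
  have hright : (∑ i ∈ Finset.range N, ∑ j ∈ Finset.range N, if j + 1 < N then |cell L ↑i ↑j - cell L ↑i (↑j + 1)| else 0)
      = ∑ i ∈ Finset.range N, ∑ j ∈ Finset.range (N - 1), |cell L ↑i ↑j - cell L ↑i (↑j + 1)| := by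
    refine Finset.sum_congr rfl (fun i _ => ?_)
    rw [sum_trim]
  rw [hup, hdown, hleft, hright]
  ring

-- ===== VERDICT (by name: the statement is the Claim_ definition above) =====
theorem delta_search_spec : Claim_equal_delta_search := by
  intro n L _dom _pre
  unfold Spec_delta_search
  by_cases h : 0 ≤ n
  · have hn : n = (n.toNat : Int) := (Int.toNat_of_nonneg h).symm
    rw [A_eq_sum n L h, B_eq_sum n L h, ← pairing n.toNat L, hn]; simp
  · have h1 : n ≤ 0 := by omega
    have h2 : n - 1 ≤ 0 := by omega
    show (PySem.List.pyRange 0 n 1).foldl _ 0 = delta_search_alt n L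
    unfold delta_search_alt
    rw [pyRange_nonpos n h1, pyRange_nonpos (n - 1) h2]
    simp
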